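-- pv_equiv track=rewrite | github.com/NikolaCusek/Privitci | skripta_za_modifikaciju_skupa_podataka.py | JPGPNGconverter
-- ===== SOURCE A (Python) =====
-- def JPGPNGconverter(x): #Uzme ime datoteke koja se zamjenjuje i promijeni ekstenziju u png
--     y = ""
--     x = x[::-1]
--     k = 0
--     for i in x:
--         if k > 0:
--             y = y + i
--         if i == ".":
--             k = k + 1
--     y = y[::-1]
--     return y + ".png"
-- ===== SOURCE B (Python) =====
-- def JPGPNGconverter(x):
--     return x.rpartition('.')[0] + '.png'
-- ===== Notes on version B (the rewrite author's own statement) =====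
-- stated objective: simpler
-- what changed: Replaces the reverse-the-string, character-by-character dot-counting loop with a single rpartition at the last dot; rpartition's empty head for dotless input reproduces A's behaviour of returning just the new extension there.
import Mathlib
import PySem

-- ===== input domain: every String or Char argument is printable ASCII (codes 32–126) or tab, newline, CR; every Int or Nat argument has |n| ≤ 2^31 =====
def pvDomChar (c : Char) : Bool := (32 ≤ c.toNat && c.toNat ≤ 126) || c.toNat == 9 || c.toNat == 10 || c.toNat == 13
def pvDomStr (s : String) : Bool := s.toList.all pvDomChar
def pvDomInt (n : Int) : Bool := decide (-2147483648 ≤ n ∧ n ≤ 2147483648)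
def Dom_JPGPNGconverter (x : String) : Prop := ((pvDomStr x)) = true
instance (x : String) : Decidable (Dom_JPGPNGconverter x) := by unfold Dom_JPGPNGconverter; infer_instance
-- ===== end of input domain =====

-- B replaces A's reverse-and-count-dots loop with a single partition at the last dot (simpler).

-- ===== PORT A =====
-- one loop step: 'if k > 0: y = y + i' then 'if i == ".": k = k + 1'
def stepA (st : List Char × Int) (i : Char) : List Char × Int :=
  let y := if st.2 > 0 then st.1 ++ [i] else st.1
  let k := if i = '.' then st.2 + 1 else st.2
  (y, k)

def JPGPNGconverter (x : String) : String :=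
  let xs := x.toList.reverse          -- x = x[::-1] (exact: full-string reverse slice)
  let r := xs.foldl stepA ([], 0)     -- y = ""; k = 0; for i in x: …
  String.mk r.1.reverse ++ ".png"     -- y = y[::-1]; return y + ".png"

-- ===== PORT B =====
-- head of x.rpartition('.'): scan from the end, everything before the first '.' seen; [] if no dot
def rpartHeadRev : List Char → List Char
  | [] => []
  | c :: rest => if c = '.' then rest.reverse else rpartHeadRev rest

def JPGPNGconverter_alt (x : String) : String :=
  String.mk (rpartHeadRev x.toList.reverse) ++ ".png"

-- ===== PRECONDITION & SPEC =====
def Spec_JPGPNGconverter (x : String) (out : String) : Prop := out = JPGPNGconverter_alt x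
instance (x : String) (out : String) : Decidable (Spec_JPGPNGconverter x out) := by unfold Spec_JPGPNGconverter; infer_instance

-- ===== CLAIM (what is proved, stated in full; the proofs are below) =====
def Claim_equal_JPGPNGconverter : Prop := ∀ (x : String), Dom_JPGPNGconverter x → Spec_JPGPNGconverter x (JPGPNGconverter x)

-- ===== LEMMAS AND PROOFS =====
-- once a dot has been seen (k > 0), A's loop appends every remaining character
theorem foldl_stepA_pos (r : List Char) (y : List Char) (k : Int) (hk : 0 < k) :
    (r.foldl stepA (y, k)).1 = y ++ r := by
  induction r generalizing y k with
  | nil => simp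
  | cons c rest ih =>
    simp only [List.foldl_cons, stepA]
    rw [if_pos hk]
    split
    · rw [ih (y ++ [c]) (k + 1) (by omega)]; simp
    · rw [ih (y ++ [c]) k hk]; simp

-- before any dot is seen, A's loop collects exactly the characters after the first dot of r
theorem foldl_stepA_zero (r : List Char) (y : List Char) :
    (r.foldl stepA (y, 0)).1 = y ++ (rpartHeadRev r).reverse := by
  induction r generalizing y with
  | nil => simp [rpartHeadRev]
  | cons c rest ih =>
    simp only [List.foldl_cons, stepA, rpartHeadRev]
    norm_num
    split
    · rw [foldl_stepA_pos rest y 1 (by omega)]; simp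
    · rw [ih y]

-- ===== VERDICT (by name: the statement is the Claim_ definition above) =====
theorem JPGPNGconverter_spec : Claim_equal_JPGPNGconverter := by
  intro x _
  show _ = _
  unfold JPGPNGconverter JPGPNGconverter_alt
  simp only []
  rw [show (have xs := x.toList.reverse; have r := List.foldl stepA ([], 0) xs;
      String.mk r.1.reverse ++ ".png") =
      String.mk (List.foldl stepA ([], 0) x.toList.reverse).1.reverse ++ ".png" from rfl,
    foldl_stepA_zero x.toList.reverse []]
  simp
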